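-- pv_equiv track=rewrite | github.com/Makhafagy/my-job-journey | detailed_analysis.py | detect_url_key
-- ===== SOURCE A (Python) =====
-- from typing import List, Dict, Tuple
--
-- def detect_key_by_names(fieldnames: List[str], candidates: Tuple[str, ...]) -> str:
--     low_map = { (h or "").strip().lower(): h for h in fieldnames }
--     for cand in candidates:
--         if cand in low_map:
--             return low_map[cand]
--     return ""
--
-- def detect_url_key(fieldnames: List[str]) -> str:
--     # prefer apply_url-like names
--     fn = detect_key_by_names(fieldnames, ("apply_url", "apply-url", "apply url"))
--     if fn:
--         return fn
--     # fallback heuristics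
--     low_map = { (h or "").strip().lower(): h for h in fieldnames }
--     for k_low, orig in low_map.items():
--         if "apply" in k_low and ("url" in k_low or "link" in k_low):
--             return orig
--     for k_low, orig in low_map.items():
--         if "url" in k_low or "link" in k_low:
--             return orig
--     return fieldnames[0] if fieldnames else ""
-- ===== SOURCE B (Python) =====
-- def _score(k):
--     # priority of a normalized field name; None means the name is irrelevant
--     if k == "apply_url":
--         return 0
--     elif k == "apply-url":
--         return 1
--     elif k == "apply url":
--         return 2
--     elif "apply" in k and ("url" in k or "link" in k):
--         return 3
--     elif "url" in k or "link" in k: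
--         return 4
--     return None
--
--
-- def detect_url_key(fieldnames):
--     low_map = {}
--     for h in fieldnames:
--         low_map[(h or "").strip().lower()] = h
--     best = None  # (priority, original header); first occurrence wins on ties
--     for k, orig in low_map.items():
--         pr = _score(k)
--         if pr is None:
--             continue
--         if best is None or pr < best[0]:
--             best = (pr, orig)
--     if best is not None:
--         return best[1]
--     return fieldnames[0] if fieldnames else ""
-- ===== Notes on version B (the rewrite author's own statement) =====
-- stated objective: alternative
-- what changed: Replaces A's cascade of four sequential scans (three candidate lookups in the dict, then two separate loops over its items) by a single score-and-select pass over the normalized map that tracks the minimum-priority entry.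
import Mathlib
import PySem

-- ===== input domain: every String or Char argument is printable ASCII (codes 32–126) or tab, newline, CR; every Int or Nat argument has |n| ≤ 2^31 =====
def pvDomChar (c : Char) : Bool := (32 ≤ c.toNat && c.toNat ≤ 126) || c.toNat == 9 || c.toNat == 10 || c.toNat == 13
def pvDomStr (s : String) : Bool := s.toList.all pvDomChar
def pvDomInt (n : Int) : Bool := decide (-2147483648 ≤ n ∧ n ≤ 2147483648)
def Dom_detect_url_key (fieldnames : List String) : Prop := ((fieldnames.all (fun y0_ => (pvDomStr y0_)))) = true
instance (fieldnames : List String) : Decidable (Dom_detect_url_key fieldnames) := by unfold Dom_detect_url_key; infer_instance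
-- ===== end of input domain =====

-- B replaces A's four sequential scans (three dict lookups + two item loops) by one
-- score-and-select pass over the normalized map, tracking the minimum-priority entry
-- (objective: alternative decomposition, same asymptotic cost).

-- ===== PORT A =====
-- (h or "").strip().lower(); 'h or ""' is the identity on strings
def pvNorm (h : String) : String := PySem.Str.lower (PySem.Str.strip h)

-- the candidate loop of detect_key_by_names: return low_map[cand] at the first hit
def pvDknGo (low_map : PySem.Dict String String) : List String → String
  | [] => ""
  | c :: cs =>
      match low_map.get? c with
      | some v => v
      | none => pvDknGo low_map cs

def detect_key_by_names (fieldnames : List String) (candidates : List String) : String :=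
  pvDknGo (fieldnames.foldl (fun d h => d.insert (pvNorm h) h) PySem.Dict.empty) candidates

def detect_url_key (fieldnames : List String) : String :=
  let fn := detect_key_by_names fieldnames ["apply_url", "apply-url", "apply url"]
  if fn ≠ "" then fn
  else
    let low_map := fieldnames.foldl (fun d h => d.insert (pvNorm h) h) PySem.Dict.empty
    match low_map.items.find? (fun p =>
        PySem.Str.isIn "apply" p.1 && (PySem.Str.isIn "url" p.1 || PySem.Str.isIn "link" p.1)) with
    | some (_, orig) => orig
    | none =>
      match low_map.items.find? (fun p => PySem.Str.isIn "url" p.1 || PySem.Str.isIn "link" p.1) with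
      | some (_, orig) => orig
      | none => match fieldnames with | [] => "" | h :: _ => h

-- ===== PORT B =====
def pvScore (k : String) : Option Nat :=
  if k == "apply_url" then some 0
  else if k == "apply-url" then some 1
  else if k == "apply url" then some 2
  else if PySem.Str.isIn "apply" k && (PySem.Str.isIn "url" k || PySem.Str.isIn "link" k) then some 3
  else if PySem.Str.isIn "url" k || PySem.Str.isIn "link" k then some 4
  else none

def pvBestLoop (best : Option (Nat × String)) : List (String × String) → Option (Nat × String)
  | [] => best
  | (k, orig) :: rest =>
      match pvScore k with
      | none => pvBestLoop best rest
      | some pr =>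
          match best with
          | none => pvBestLoop (some (pr, orig)) rest
          | some b => if pr < b.1 then pvBestLoop (some (pr, orig)) rest else pvBestLoop best rest

def detect_url_key_alt (fieldnames : List String) : String :=
  let low_map := fieldnames.foldl (fun d h => d.insert (pvNorm h) h) PySem.Dict.empty
  match pvBestLoop none low_map.items with
  | some (_, orig) => orig
  | none => match fieldnames with | [] => "" | h :: _ => h

-- ===== PRECONDITION & SPEC =====
def Spec_detect_url_key (fieldnames : List String) (out : String) : Prop := out = detect_url_key_alt fieldnames
instance (fieldnames : List String) (out : String) : Decidable (Spec_detect_url_key fieldnames out) := by unfold Spec_detect_url_key; infer_instance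

-- ===== CLAIM (what is proved, stated in full; the proofs are below) =====
def Claim_equal_detect_url_key : Prop := ∀ (fieldnames : List String), Dom_detect_url_key fieldnames → Spec_detect_url_key fieldnames (detect_url_key fieldnames)

-- ===== LEMMAS AND PROOFS =====

-- first element of minimal score (head wins ties): functional description of B's loop
def pvM : List (String × String) → Option (Nat × String)
  | [] => none
  | (k, v) :: t =>
      match pvScore k, pvM t with
      | none, r => r
      | some p, none => some (p, v)
      | some p, some (q, w) => if p ≤ q then some (p, v) else some (q, w)

theorem pvBestLoop_eq (best : Option (Nat × String)) (L : List (String × String)) :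
    pvBestLoop best L =
      match best, pvM L with
      | b, none => b
      | none, r => r
      | some b, some (q, w) => if q < b.1 then some (q, w) else some b := by
  induction L generalizing best with
  | nil => cases best <;> simp [pvBestLoop, pvM]
  | cons hd t ih =>
      obtain ⟨k, v⟩ := hd
      cases best with
      | none =>
          cases hsc : pvScore k with
          | none =>
              cases hm : pvM t <;> simp [pvBestLoop, pvM, hsc, hm, ih]
          | some p =>
              cases hm : pvM t with
              | none => simp [pvBestLoop, pvM, hsc, hm, ih]
              | some qw =>
                  obtain ⟨q, w⟩ := qw
                  by_cases hpq : p ≤ q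
                  · simp [pvBestLoop, pvM, hsc, hm, ih, hpq, show ¬ q < p by omega]
                  · simp [pvBestLoop, pvM, hsc, hm, ih, hpq, show q < p by omega]
      | some b =>
          cases hsc : pvScore k with
          | none =>
              cases hm : pvM t <;> simp [pvBestLoop, pvM, hsc, hm, ih]
          | some p =>
              cases hm : pvM t with
              | none =>
                  by_cases hb : p < b.1 <;> simp [pvBestLoop, pvM, hsc, hm, ih, hb]
              | some qw =>
                  obtain ⟨q, w⟩ := qw
                  by_cases hb : p < b.1
                  · by_cases hpq : p ≤ q
                    · simp [pvBestLoop, pvM, hsc, hm, ih, hb, hpq, show ¬ q < p by omega]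
                    · by_cases hqb : q < b.1
                      · simp [pvBestLoop, pvM, hsc, hm, ih, hb, hpq, hqb, show q < p by omega]
                      · omega
                  · by_cases hpq : p ≤ q
                    · by_cases hqb : q < b.1
                      · omega
                      · simp [pvBestLoop, pvM, hsc, hm, ih, hb, hpq, hqb]
                    · by_cases hqb : q < b.1 <;>
                        simp [pvBestLoop, pvM, hsc, hm, ih, hb, hpq, hqb]

theorem pvM_none_iff (L : List (String × String)) :
    pvM L = none ↔ ∀ p ∈ L, pvScore p.1 = none := by
  induction L with
  | nil => simp [pvM]
  | cons hd t ih =>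
      obtain ⟨k, v⟩ := hd
      cases hsc : pvScore k with
      | none => simp [pvM, hsc, ih]
      | some p =>
          constructor
          · intro hnone
            exfalso
            simp only [pvM, hsc] at hnone
            cases hm : pvM t with
            | none => rw [hm] at hnone; simp at hnone
            | some qw =>
                obtain ⟨q, w⟩ := qw
                rw [hm] at hnone
                by_cases hle : p ≤ q <;> simp [hle] at hnone
          · intro h
            exact absurd (h (k, v) (by simp)) (by simp [hsc])

theorem pvM_some (L : List (String × String)) (p : Nat) (v : String)
    (h : pvM L = some (p, v)) :
    (∀ q ∈ L, ∀ j, pvScore q.1 = some j → p ≤ j) ∧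
    ∃ L1 k L2, L = L1 ++ (k, v) :: L2 ∧ pvScore k = some p ∧
      (∀ q ∈ L1, ∀ j, pvScore q.1 = some j → p < j) := by
  induction L generalizing p v with
  | nil => simp [pvM] at h
  | cons hd t ih =>
      obtain ⟨k0, v0⟩ := hd
      simp only [pvM] at h
      cases hsc : pvScore k0 with
      | none =>
          rw [hsc] at h
          obtain ⟨hall, L1, k, L2, hsplit, hk, hstrict⟩ := ih p v h
          refine ⟨?_, (k0, v0) :: L1, k, L2, by simp [hsplit], hk, ?_⟩
          · intro q hq j hj
            rcases List.mem_cons.mp hq with hq | hq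
            · subst hq; simp [hsc] at hj
            · exact hall q hq j hj
          · intro q hq j hj
            rcases List.mem_cons.mp hq with hq | hq
            · subst hq; simp [hsc] at hj
            · exact hstrict q hq j hj
      | some p0 =>
          rw [hsc] at h
          cases hm : pvM t with
          | none =>
              rw [hm] at h
              simp at h
              obtain ⟨hp, hv⟩ := h
              subst hp; subst hv
              refine ⟨?_, [], k0, t, by simp, hsc, by simp⟩
              intro q hq j hj
              rcases List.mem_cons.mp hq with hq | hq
              · subst hq; simp [hsc] at hj; omega
              · exact absurd hj (by rw [(pvM_none_iff t).mp hm q hq]; simp)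
          | some qw =>
              obtain ⟨q0, w0⟩ := qw
              rw [hm] at h
              obtain ⟨hall, L1, k, L2, hsplit, hk, hstrict⟩ := ih q0 w0 hm
              by_cases hle : p0 ≤ q0
              · simp [hle] at h
                obtain ⟨hp, hv⟩ := h
                subst hp; subst hv
                refine ⟨?_, [], k0, t, by simp, hsc, by simp⟩
                intro q hq j hj
                rcases List.mem_cons.mp hq with hq | hq
                · subst hq; simp [hsc] at hj; omega
                · exact le_trans hle (hall q hq j hj)
              · simp [hle] at h
                obtain ⟨hp, hv⟩ := h
                subst hp; subst hv
                refine ⟨?_, (k0, v0) :: L1, k, L2, by simp [hsplit], hk, ?_⟩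
                · intro q hq j hj
                  rcases List.mem_cons.mp hq with hq | hq
                  · subst hq; simp [hsc] at hj; omega
                  · exact hall q hq j hj
                · intro q hq j hj
                  rcases List.mem_cons.mp hq with hq | hq
                  · subst hq; simp [hsc] at hj; omega
                  · exact hstrict q hq j hj

-- score facts
theorem score_le2 (k : String) (p : Nat) (h : pvScore k = some p) (hp : p ≤ 2) :
    (p = 0 ∧ k = "apply_url") ∨ (p = 1 ∧ k = "apply-url") ∨ (p = 2 ∧ k = "apply url") := by
  unfold pvScore at h
  split_ifs at h with h0 h1 h2 h3 h4 <;> simp_all <;> omega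

theorem score_le4 (k : String) (p : Nat) (h : pvScore k = some p) : p ≤ 4 := by
  unfold pvScore at h
  split_ifs at h <;> simp_all <;> omega

theorem score_eq3 (k : String) (h : pvScore k = some 3) :
    (PySem.Str.isIn "apply" k && (PySem.Str.isIn "url" k || PySem.Str.isIn "link" k)) = true := by
  unfold pvScore at h
  split_ifs at h with h0 h1 h2 h3 h4 <;> try simp_all

theorem score_of_pred3 (k : String)
    (h : (PySem.Str.isIn "apply" k && (PySem.Str.isIn "url" k || PySem.Str.isIn "link" k)) = true) :
    ∃ p, pvScore k = some p ∧ p ≤ 3 := by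
  unfold pvScore
  split_ifs with h0 h1 h2 h3 h4
  all_goals first
    | exact ⟨0, rfl, by omega⟩
    | exact ⟨1, rfl, by omega⟩
    | exact ⟨2, rfl, by omega⟩
    | exact ⟨3, rfl, by omega⟩
    | exact absurd h h3

theorem score_eq4 (k : String) (h : pvScore k = some 4) :
    (PySem.Str.isIn "url" k || PySem.Str.isIn "link" k) = true := by
  unfold pvScore at h
  split_ifs at h with h0 h1 h2 h3 h4 <;> try simp_all

theorem score_of_pred4 (k : String)
    (h : (PySem.Str.isIn "url" k || PySem.Str.isIn "link" k) = true) :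
    ∃ p, pvScore k = some p ∧ p ≤ 4 := by
  unfold pvScore
  split_ifs with h0 h1 h2 h3 h4
  all_goals first
    | exact ⟨0, rfl, by omega⟩
    | exact ⟨1, rfl, by omega⟩
    | exact ⟨2, rfl, by omega⟩
    | exact ⟨3, rfl, by omega⟩
    | exact ⟨4, rfl, by omega⟩
    | exact absurd h h4

-- the built dict: items invariant
theorem lowmap_inv (fieldnames : List String) (d : PySem.Dict String String)
    (hd : ∀ q ∈ d.items, q.1 = pvNorm q.2) :
    ∀ q ∈ (fieldnames.foldl (fun d h => d.insert (pvNorm h) h) d).items, q.1 = pvNorm q.2 := by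
  induction fieldnames generalizing d with
  | nil => simpa using hd
  | cons h t ih =>
      simp only [List.foldl_cons]
      refine ih _ ?_
      intro q hq
      rw [PySem.Dict.items_insert] at hq
      split at hq
      · rw [List.mem_map] at hq
        obtain ⟨r, hr, hrq⟩ := hq
        by_cases hc : r.1 == pvNorm h
        · rw [if_pos hc] at hrq; subst hrq; rfl
        · rw [if_neg hc] at hrq; subst hrq; exact hd r hr
      · rcases List.mem_append.mp hq with hq | hq
        · exact hd q hq
        · simp at hq; subst hq; rfl

-- get? as find? on items
theorem get?_eq_find (d : PySem.Dict String String) (c : String) :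
    d.get? c = (d.items.find? (fun p => p.1 == c)).map Prod.snd := by
  obtain ⟨l⟩ := d
  induction l with
  | nil => simp [PySem.Dict.get?]
  | cons hd t ih =>
      obtain ⟨k, v⟩ := hd
      rw [PySem.Dict.get?_mk_cons]
      by_cases h : k == c
      · rw [if_pos h]
        rw [show ((PySem.Dict.mk ((k, v) :: t)).items.find? (fun p => p.1 == c)) = some (k, v) from
          List.find?_cons_of_pos (by simpa using h)]
        rfl
      · rw [if_neg h]
        rw [show ((PySem.Dict.mk ((k, v) :: t)).items.find? (fun p => p.1 == c)) =
            (t.find? (fun p => p.1 == c)) from List.find?_cons_of_neg (by simpa using h)]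
        exact ih

-- first-match on a decomposed list
theorem find?_split {α : Type} (L1 L2 : List α) (x : α) (pred : α → Bool)
    (h1 : ∀ y ∈ L1, pred y = false) (hx : pred x = true) :
    ((L1 ++ x :: L2).find? pred) = some x := by
  induction L1 with
  | nil => simp [List.find?_cons_of_pos hx]
  | cons a t ih =>
      rw [List.cons_append, List.find?_cons_of_neg (by simp [h1 a (by simp)]),
          ih (fun y hy => h1 y (by simp [hy]))]

-- A's cascade and B's selection, abstracted over the items list and the default
def pvAcore (L : List (String × String)) (d0 : String) : String :=
  if pvDknGo (PySem.Dict.mk L) ["apply_url", "apply-url", "apply url"] ≠ "" then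
    pvDknGo (PySem.Dict.mk L) ["apply_url", "apply-url", "apply url"]
  else
    match L.find? (fun p =>
        PySem.Str.isIn "apply" p.1 && (PySem.Str.isIn "url" p.1 || PySem.Str.isIn "link" p.1)) with
    | some (_, orig) => orig
    | none =>
      match L.find? (fun p => PySem.Str.isIn "url" p.1 || PySem.Str.isIn "link" p.1) with
      | some (_, orig) => orig
      | none => d0

def pvBcore (L : List (String × String)) (d0 : String) : String :=
  match pvBestLoop none L with
  | some (_, orig) => orig
  | none => d0

theorem val_ne_empty (k v : String) (hkv : k = pvNorm v) (hk : k ≠ "") : v ≠ "" := by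
  intro hv
  subst hv
  exact hk (by rw [hkv]; decide)

theorem main_core (L : List (String × String))
    (hinv : ∀ q ∈ L, q.1 = pvNorm q.2) (d0 : String) :
    pvAcore L d0 = pvBcore L d0 := by
  unfold pvBcore
  rw [pvBestLoop_eq]
  cases hM : pvM L with
  | none =>
      have hall := (pvM_none_iff L).mp hM
      have gc : ∀ c : String, pvScore c ≠ none →
          (L.find? (fun p => p.1 == c)) = none := by
        intro c hc
        rw [List.find?_eq_none]
        intro x hx hbe
        exact hc (by rw [← (beq_iff_eq.mp hbe)]; exact hall x hx)
      have g3 : (L.find? (fun p =>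
          PySem.Str.isIn "apply" p.1 && (PySem.Str.isIn "url" p.1 || PySem.Str.isIn "link" p.1))) = none := by
        rw [List.find?_eq_none]
        intro x hx hp
        obtain ⟨j, hj, _⟩ := score_of_pred3 x.1 hp
        rw [hall x hx] at hj
        simp at hj
      have g4 : (L.find? (fun p => PySem.Str.isIn "url" p.1 || PySem.Str.isIn "link" p.1)) = none := by
        rw [List.find?_eq_none]
        intro x hx hp
        obtain ⟨j, hj, _⟩ := score_of_pred4 x.1 hp
        rw [hall x hx] at hj
        simp at hj
      have hdkn : pvDknGo (PySem.Dict.mk L) ["apply_url", "apply-url", "apply url"] = "" := by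
        simp [pvDknGo, get?_eq_find,
          gc "apply_url" (by decide), gc "apply-url" (by decide), gc "apply url" (by decide)]
      unfold pvAcore
      rw [hdkn, if_neg (by simp), g3, g4]
  | some pv =>
      obtain ⟨p, v⟩ := pv
      obtain ⟨hall, L1, k, L2, hsplit, hk, hstrict⟩ := pvM_some L p v hM
      have hkmem : (k, v) ∈ L := by rw [hsplit]; simp
      have hkinv : k = pvNorm v := hinv (k, v) hkmem
      have hp4 : p ≤ 4 := score_le4 k p hk
      -- absence of a candidate key below priority j
      have gnone : ∀ c : String, ∀ jc : Nat, pvScore c = some jc → jc < p →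
          (L.find? (fun q => q.1 == c)) = none := by
        intro c jc hjc hjp
        rw [List.find?_eq_none]
        intro x hx hbe
        have hx1 : x.1 = c := beq_iff_eq.mp hbe
        have := hall x hx jc (by rw [hx1]; exact hjc)
        omega
      have gfound : ∀ c : String, pvScore c = some p → k = c →
          (L.find? (fun q => q.1 == c)) = some (k, v) := by
        intro c hc hkc
        rw [hsplit]
        refine find?_split _ _ _ _ ?_ (by simp [hkc])
        intro y hy
        by_cases hb : y.1 == c
        · have := hstrict y hy p (by rw [beq_iff_eq.mp hb]; exact hc)
          omega
        · simpa using hb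
      interval_cases p
      · -- p = 0 : key "apply_url"
        rcases score_le2 k 0 hk (by omega) with ⟨_, hkc⟩ | ⟨hh, _⟩ | ⟨hh, _⟩ <;> try omega
        have hv : v ≠ "" := val_ne_empty k v hkinv (by rw [hkc]; decide)
        have hdkn : pvDknGo (PySem.Dict.mk L) ["apply_url", "apply-url", "apply url"] = v := by
          simp [pvDknGo, get?_eq_find, gfound "apply_url" (by decide) hkc]
        unfold pvAcore
        rw [hdkn, if_pos hv]
      · -- p = 1 : key "apply-url"
        rcases score_le2 k 1 hk (by omega) with ⟨hh, _⟩ | ⟨_, hkc⟩ | ⟨hh, _⟩ <;> try omega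
        have hv : v ≠ "" := val_ne_empty k v hkinv (by rw [hkc]; decide)
        have hdkn : pvDknGo (PySem.Dict.mk L) ["apply_url", "apply-url", "apply url"] = v := by
          simp [pvDknGo, get?_eq_find, gnone "apply_url" 0 (by decide) (by omega),
            gfound "apply-url" (by decide) hkc]
        unfold pvAcore
        rw [hdkn, if_pos hv]
      · -- p = 2 : key "apply url"
        rcases score_le2 k 2 hk (by omega) with ⟨hh, _⟩ | ⟨hh, _⟩ | ⟨_, hkc⟩ <;> try omega
        have hv : v ≠ "" := val_ne_empty k v hkinv (by rw [hkc]; decide)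
        have hdkn : pvDknGo (PySem.Dict.mk L) ["apply_url", "apply-url", "apply url"] = v := by
          simp [pvDknGo, get?_eq_find, gnone "apply_url" 0 (by decide) (by omega),
            gnone "apply-url" 1 (by decide) (by omega), gfound "apply url" (by decide) hkc]
        unfold pvAcore
        rw [hdkn, if_pos hv]
      · -- p = 3 : apply ∧ (url ∨ link)
        have g3 : (L.find? (fun q =>
            PySem.Str.isIn "apply" q.1 && (PySem.Str.isIn "url" q.1 || PySem.Str.isIn "link" q.1))) = some (k, v) := by
          rw [hsplit]
          refine find?_split _ _ _ _ ?_ (score_eq3 k hk)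
          intro y hy
          by_cases hb : (PySem.Str.isIn "apply" y.1 && (PySem.Str.isIn "url" y.1 || PySem.Str.isIn "link" y.1))
          · obtain ⟨j, hj, hj3⟩ := score_of_pred3 y.1 hb
            have := hstrict y hy j hj
            omega
          · simpa using hb
        have hdkn : pvDknGo (PySem.Dict.mk L) ["apply_url", "apply-url", "apply url"] = "" := by
          simp [pvDknGo, get?_eq_find, gnone "apply_url" 0 (by decide) (by omega),
            gnone "apply-url" 1 (by decide) (by omega), gnone "apply url" 2 (by decide) (by omega)]
        unfold pvAcore
        rw [hdkn, if_neg (by simp), g3]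
      · -- p = 4 : url ∨ link only
        have g3 : (L.find? (fun q =>
            PySem.Str.isIn "apply" q.1 && (PySem.Str.isIn "url" q.1 || PySem.Str.isIn "link" q.1))) = none := by
          rw [List.find?_eq_none]
          intro x hx hp
          obtain ⟨j, hj, hj3⟩ := score_of_pred3 x.1 hp
          have := hall x hx j hj
          omega
        have g4 : (L.find? (fun q => PySem.Str.isIn "url" q.1 || PySem.Str.isIn "link" q.1)) = some (k, v) := by
          rw [hsplit]
          refine find?_split _ _ _ _ ?_ (score_eq4 k hk)
          intro y hy
          by_cases hb : (PySem.Str.isIn "url" y.1 || PySem.Str.isIn "link" y.1)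
          · obtain ⟨j, hj, hj4⟩ := score_of_pred4 y.1 hb
            have := hstrict y hy j hj
            omega
          · simpa using hb
        have hdkn : pvDknGo (PySem.Dict.mk L) ["apply_url", "apply-url", "apply url"] = "" := by
          simp [pvDknGo, get?_eq_find, gnone "apply_url" 0 (by decide) (by omega),
            gnone "apply-url" 1 (by decide) (by omega), gnone "apply url" 2 (by decide) (by omega)]
        unfold pvAcore
        rw [hdkn, if_neg (by simp), g3, g4]

-- ===== VERDICT (by name: the statement is the Claim_ definition above) =====
theorem detect_url_key_spec : Claim_equal_detect_url_key := by
  intro fieldnames _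
  unfold Spec_detect_url_key
  have hinv : ∀ q ∈ (fieldnames.foldl (fun d h => d.insert (pvNorm h) h) PySem.Dict.empty).items,
      q.1 = pvNorm q.2 :=
    lowmap_inv fieldnames PySem.Dict.empty (by intro q hq; simp [PySem.Dict.empty] at hq)
  calc detect_url_key fieldnames
      = pvAcore (fieldnames.foldl (fun d h => d.insert (pvNorm h) h) PySem.Dict.empty).items
          (match fieldnames with | [] => "" | h :: _ => h) := rfl
    _ = pvBcore (fieldnames.foldl (fun d h => d.insert (pvNorm h) h) PySem.Dict.empty).items
          (match fieldnames with | [] => "" | h :: _ => h) := main_core _ hinv _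
    _ = detect_url_key_alt fieldnames := rfl
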